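-- pv_equiv track=rewrite | github.com/FelipeTsuyoshiSuzuki/python-study | exercicios/Esteganografia.py | convert_bacon_to_bin
-- ===== SOURCE A (Python) =====
-- def convert_bacon_to_bin(bacon_string):
--     bin_string = ""
--     for i in bacon_string:
--         if i == 'A':
--             bin_string += '0'
--         elif i == 'B':
--             bin_string += '1'
--         else:
--             return None
--     return bin_string
-- ===== SOURCE B (Python) =====
-- def convert_bacon_to_bin(bacon_string):
--     if not all(c in 'AB' for c in bacon_string):
--         return None
--     return bacon_string.translate(str.maketrans('AB', '01'))
-- ===== Notes on version B (the rewrite author's own statement) =====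
-- stated objective: idiomatic
-- what changed: Replaced the fused check-and-append loop (early return on first bad char) with a whole-string validation pass followed by a bulk str.translate, splitting checking from translation.
import Mathlib
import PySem

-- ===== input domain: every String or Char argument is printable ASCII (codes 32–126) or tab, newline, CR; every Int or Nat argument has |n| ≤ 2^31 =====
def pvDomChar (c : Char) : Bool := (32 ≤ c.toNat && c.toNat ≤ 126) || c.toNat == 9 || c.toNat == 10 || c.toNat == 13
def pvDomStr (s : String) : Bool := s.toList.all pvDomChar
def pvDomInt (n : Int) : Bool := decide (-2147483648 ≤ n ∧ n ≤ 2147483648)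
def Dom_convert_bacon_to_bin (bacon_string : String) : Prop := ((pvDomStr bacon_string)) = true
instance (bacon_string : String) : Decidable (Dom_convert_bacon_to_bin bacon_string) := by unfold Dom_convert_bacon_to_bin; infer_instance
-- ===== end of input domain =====

-- B splits A's fused check-and-append loop into a separate full-string validation and a bulk translate.
-- ===== PORT A =====
-- the for-loop with its growing accumulator and early `return None`, as structural recursion
def baconLoopA : List Char → String → Option String
  | [], bin_string => some bin_string
  | i :: rest, bin_string =>
      if i = 'A' then baconLoopA rest (bin_string ++ "0")
      else if i = 'B' then baconLoopA rest (bin_string ++ "1")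
      else none

def convert_bacon_to_bin (bacon_string : String) : Option String :=
  baconLoopA bacon_string.toList ""

-- ===== PORT B =====
def convert_bacon_to_bin_alt (bacon_string : String) : Option String :=
  if bacon_string.toList.all (fun c => c = 'A' ∨ c = 'B') then
    some (String.ofList (bacon_string.toList.map (fun c => if c = 'A' then '0' else '1')))
  else
    none

-- ===== PRECONDITION & SPEC =====
def Spec_convert_bacon_to_bin (bacon_string : String) (out : Option String) : Prop := out = convert_bacon_to_bin_alt bacon_string
instance (bacon_string : String) (out : Option String) : Decidable (Spec_convert_bacon_to_bin bacon_string out) := by unfold Spec_convert_bacon_to_bin; infer_instance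

-- ===== CLAIM (what is proved, stated in full; the proofs are below) =====
def Claim_equal_convert_bacon_to_bin : Prop := ∀ (bacon_string : String), Dom_convert_bacon_to_bin bacon_string → Spec_convert_bacon_to_bin bacon_string (convert_bacon_to_bin bacon_string)

-- ===== LEMMAS AND PROOFS =====
theorem app_singleton_ofList (a : String) (c : Char) (l : List Char) :
    a.push c ++ String.ofList l = a ++ String.ofList (c :: l) := by
  apply String.toList_injective; simp

theorem baconLoopA_eq (l : List Char) : ∀ (acc : String),
    baconLoopA l acc =
      if l.all (fun c => c = 'A' ∨ c = 'B') then
        some (acc ++ String.ofList (l.map (fun c => if c = 'A' then '0' else '1')))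
      else none := by
  induction l with
  | nil => intro acc; simp [baconLoopA]
  | cons c rest ih =>
      intro acc
      by_cases hA : c = 'A'
      · subst hA
        rw [show baconLoopA ('A' :: rest) acc = baconLoopA rest (acc ++ "0") from rfl, ih]
        rw [show (acc ++ "0") = acc ++ String.singleton '0' from rfl]
        simp [app_singleton_ofList]
      · by_cases hB : c = 'B'
        · subst hB
          rw [show baconLoopA ('B' :: rest) acc = baconLoopA rest (acc ++ "1") from rfl, ih]
          rw [show (acc ++ "1") = acc ++ String.singleton '1' from rfl]
          simp [app_singleton_ofList]
        · simp [baconLoopA, hA, hB]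

-- ===== VERDICT (by name: the statement is the Claim_ definition above) =====
theorem convert_bacon_to_bin_spec : Claim_equal_convert_bacon_to_bin := by
  intro s _
  unfold Spec_convert_bacon_to_bin convert_bacon_to_bin convert_bacon_to_bin_alt
  rw [baconLoopA_eq]
  split <;> simp
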